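-- pv_equiv track=rewrite | github.com/neemias8/TAVERN | stage4_abstractive_generation/generator.py | _segment_events
-- ===== SOURCE A (Python) =====
-- from typing import Any, Dict, List, Optional, Tuple
--
-- TEMPORAL_SEGMENTS = [
--     ('Saturday',        'Saturday events at Bethany'),
--     ('Palm Sunday',     'Triumphal entry into Jerusalem'),
--     ('Monday',          'Temple cleansing and cursing of the fig tree'),
--     ('Tuesday',         'Teachings, parables, and controversies'),
--     ('Wednesday',       'Plot against Jesus and anointing'),
--     ('Thursday',        'Last Supper and Gethsemane'),
--     ('Friday',          'Trial, crucifixion, and burial'),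
--     ('Saturday (Rest)', 'The Sabbath rest'),
--     ('Sunday',          'Resurrection and appearances'),
-- ]
--
-- def _segment_events(consolidated_events: List[Dict]) -> List[Tuple[str, List[Dict]]]:
--     """Partition consolidated events into temporal segments based on the
--     ``day`` field from the chronology table.
--
--     Returns a list of ``(segment_label, events_in_segment)`` tuples.
--     """
--     # Group by day
--     day_groups: Dict[str, List[Dict]] = {}
--     for ev in consolidated_events:
--         day = (ev.get('day') or 'Unknown').strip()
--         day_groups.setdefault(day, []).append(ev)
--
--     # Order segments according to the predefined temporal order
--     day_order = {s[0]: i for i, s in enumerate(TEMPORAL_SEGMENTS)}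
--     ordered_segments = []
--     seen_days = set()
--
--     for day_label, _ in TEMPORAL_SEGMENTS:
--         for key in list(day_groups.keys()):
--             if key.lower().startswith(day_label.lower().split(' (')[0].lower()):
--                 ordered_segments.append((day_label, day_groups.pop(key)))
--                 seen_days.add(key)
--
--     # Add any remaining days not in our predefined list
--     for day, evts in day_groups.items():
--         if day not in seen_days:
--             ordered_segments.append((day, evts))
--
--     return ordered_segments
-- ===== SOURCE B (Python) =====
-- from typing import Any, Dict, List, Optional, Tuple
--
-- TEMPORAL_SEGMENTS = [
--     ('Saturday',        'Saturday events at Bethany'),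
--     ('Palm Sunday',     'Triumphal entry into Jerusalem'),
--     ('Monday',          'Temple cleansing and cursing of the fig tree'),
--     ('Tuesday',         'Teachings, parables, and controversies'),
--     ('Wednesday',       'Plot against Jesus and anointing'),
--     ('Thursday',        'Last Supper and Gethsemane'),
--     ('Friday',          'Trial, crucifixion, and burial'),
--     ('Saturday (Rest)', 'The Sabbath rest'),
--     ('Sunday',          'Resurrection and appearances'),
-- ]
--
-- def _seg_index(key: str) -> int:
--     """First temporal segment whose day-prefix the key starts with, else len."""
--     kl = key.lower()
--     i = 0
--     for label, _ in TEMPORAL_SEGMENTS: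
--         if kl.startswith(label.split(' (')[0].lower()):
--             return i
--         i += 1
--     return i
--
-- def _segment_events(consolidated_events: List[Dict]) -> List[Tuple[str, List[Dict]]]:
--     # Group by day (same first pass)
--     day_groups: Dict[str, List[Dict]] = {}
--     for ev in consolidated_events:
--         day = (ev.get('day') or 'Unknown').strip()
--         day_groups.setdefault(day, []).append(ev)
--
--     # Stable-sort the day keys by their first matching segment index; unmatched
--     # keys sort last and keep their own key as label.
--     n = len(TEMPORAL_SEGMENTS)
--     result = []
--     for key in sorted(day_groups, key=_seg_index):
--         i = _seg_index(key)
--         label = TEMPORAL_SEGMENTS[i][0] if i < n else key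
--         result.append((label, day_groups[key]))
--     return result
-- ===== Notes on version B (the rewrite author's own statement) =====
-- stated objective: alternative
-- what changed: The segment-outer/key-inner dict-pop loop plus the leftover pass is replaced by computing each day key's first matching segment index and stable-sorting the keys by it, emitting one tuple per key from the sorted order.
import Mathlib
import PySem

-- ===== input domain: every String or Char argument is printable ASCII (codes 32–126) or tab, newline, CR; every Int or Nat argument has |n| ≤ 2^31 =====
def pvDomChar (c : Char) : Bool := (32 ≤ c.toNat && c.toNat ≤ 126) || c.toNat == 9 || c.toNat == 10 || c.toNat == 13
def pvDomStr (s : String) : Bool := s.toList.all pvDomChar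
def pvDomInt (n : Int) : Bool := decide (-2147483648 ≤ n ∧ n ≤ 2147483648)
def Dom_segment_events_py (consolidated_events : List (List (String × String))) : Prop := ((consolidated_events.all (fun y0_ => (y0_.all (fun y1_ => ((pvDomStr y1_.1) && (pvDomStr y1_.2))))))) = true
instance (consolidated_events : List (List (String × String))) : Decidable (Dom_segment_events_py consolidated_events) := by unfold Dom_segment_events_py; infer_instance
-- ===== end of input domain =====

-- B replaces A's segment-outer/key-inner dict-pop loop by stable-sorting the day keys
-- by their first matching segment index (objective: alternative; return value only).

-- ===== PORT A =====
def pvSegments : List (String × String) := [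
  ("Saturday",        "Saturday events at Bethany"),
  ("Palm Sunday",     "Triumphal entry into Jerusalem"),
  ("Monday",          "Temple cleansing and cursing of the fig tree"),
  ("Tuesday",         "Teachings, parables, and controversies"),
  ("Wednesday",       "Plot against Jesus and anointing"),
  ("Thursday",        "Last Supper and Gethsemane"),
  ("Friday",          "Trial, crucifixion, and burial"),
  ("Saturday (Rest)", "The Sabbath rest"),
  ("Sunday",          "Resurrection and appearances")]

-- (ev.get('day') or 'Unknown').strip()
def pvDayOf (ev : List (String × String)) : String :=
  PySem.Str.strip (match (PySem.Dict.mk ev).get? "day" with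
    | none => "Unknown"
    | some s => if s = "" then "Unknown" else s)

-- the grouping pass shared verbatim by both Pythons: day_groups.setdefault(day, []).append(ev)
def pvGroupDays (ce : List (List (String × String))) : PySem.Dict String (List (List (String × String))) :=
  ce.foldl (fun d ev => d.modify (pvDayOf ev) [] (fun l => l ++ [ev])) PySem.Dict.empty

-- day_label.lower().split(' (')[0].lower() ; split(' (') never has empty sep, [0] of a split is total
def pvPrefixA (label : String) : String :=
  PySem.Str.lower (((PySem.Str.split? (PySem.Str.lower label) " (").getD []).headD "")

-- key.lower().startswith(...)
def pvMatchA (key label : String) : Bool :=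
  PySem.Str.startswith (PySem.Str.lower key) (pvPrefixA label)

-- the inner 'for key in list(day_groups.keys())' loop of A, popping matches
def pvInnerA (label : String)
    (st : PySem.Dict String (List (List (String × String))) ×
          (PySem.Set String × List (String × List (List (String × String))))) :
    PySem.Dict String (List (List (String × String))) ×
      (PySem.Set String × List (String × List (List (String × String)))) :=
  st.1.keys.foldl (fun st2 key =>
    if pvMatchA key label then
      match st2.1.pop? key with
      | some (v, d') => (d', (PySem.Set.add st2.2.1 key, st2.2.2 ++ [(label, v)]))
      | none => st2
    else st2) st

def segment_events_py (consolidated_events : List (List (String × String))) :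
    List (String × (List (List (String × String)))) :=
  let day_groups := pvGroupDays consolidated_events
  let _day_order := PySem.Dict.ofList ((PySem.List.enumerate pvSegments).map (fun p => (p.2.1, p.1)))
  let fin := pvSegments.foldl (fun st seg => pvInnerA seg.1 st)
    (day_groups, (PySem.Set.ofList [], []))
  fin.1.items.foldl (fun out p => if PySem.Set.contains fin.2.1 p.1 then out else out ++ [p]) fin.2.2

-- ===== PORT B =====
-- label.split(' (')[0].lower()
def pvPrefixB (label : String) : String :=
  PySem.Str.lower (((PySem.Str.split? label " (").getD []).headD "")

-- the enumerate loop inside _seg_index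
def pvSegIndexAux (kl : String) : Nat → List (String × String) → Nat
  | i, [] => i
  | i, (label, _) :: rest =>
      if PySem.Str.startswith kl (pvPrefixB label) then i else pvSegIndexAux kl (i + 1) rest

def pvSegIndex (key : String) : Nat := pvSegIndexAux (PySem.Str.lower key) 0 pvSegments

def segment_events_py_alt (consolidated_events : List (List (String × String))) :
    List (String × (List (List (String × String)))) :=
  let day_groups := pvGroupDays consolidated_events
  let n := pvSegments.length
  (PySem.List.sorted day_groups.keys (fun k => pvSegIndex k)).foldl
    (fun res key =>
      let i := pvSegIndex key
      let label := if i < n then (pvSegments.getD i ("", "")).1 else key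
      res ++ [(label, day_groups.getD key [])]) []

-- ===== PRECONDITION & SPEC =====
def Spec_segment_events_py (consolidated_events : List (List (String × String))) (out : List (String × (List (List (String × String))))) : Prop := out = segment_events_py_alt consolidated_events
instance (consolidated_events : List (List (String × String))) (out : List (String × (List (List (String × String))))) : Decidable (Spec_segment_events_py consolidated_events out) := by unfold Spec_segment_events_py; infer_instance

-- ===== CLAIM (what is proved, stated in full; the proofs are below) =====
def Claim_equal_segment_events_py : Prop := ∀ (consolidated_events : List (List (String × String))), Dom_segment_events_py consolidated_events → Spec_segment_events_py consolidated_events (segment_events_py consolidated_events)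

-- ===== LEMMAS AND PROOFS =====

-- B's match test, factored: lower(key).startswith(prefix of label)
def pvMatchB (key label : String) : Bool :=
  PySem.Str.startswith (PySem.Str.lower key) (pvPrefixB label)

lemma pvMatchB_eq (k label : String) :
    PySem.Str.startswith (PySem.Str.lower k) (pvPrefixB label) = pvMatchB k label := rfl

-- the two prefix computations agree on the nine literal labels
lemma pvPrefix_eq : ∀ s ∈ pvSegments, pvPrefixA s.1 = pvPrefixB s.1 := by
  intro s hs
  fin_cases hs
  · exact (by decide : pvPrefixA "Saturday" = "saturday").trans
      (by decide : pvPrefixB "Saturday" = "saturday").symm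
  · exact (by decide : pvPrefixA "Palm Sunday" = "palm sunday").trans
      (by decide : pvPrefixB "Palm Sunday" = "palm sunday").symm
  · exact (by decide : pvPrefixA "Monday" = "monday").trans
      (by decide : pvPrefixB "Monday" = "monday").symm
  · exact (by decide : pvPrefixA "Tuesday" = "tuesday").trans
      (by decide : pvPrefixB "Tuesday" = "tuesday").symm
  · exact (by decide : pvPrefixA "Wednesday" = "wednesday").trans
      (by decide : pvPrefixB "Wednesday" = "wednesday").symm
  · exact (by decide : pvPrefixA "Thursday" = "thursday").trans
      (by decide : pvPrefixB "Thursday" = "thursday").symm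
  · exact (by decide : pvPrefixA "Friday" = "friday").trans
      (by decide : pvPrefixB "Friday" = "friday").symm
  · exact (by decide : pvPrefixA "Saturday (Rest)" = "saturday").trans
      (by decide : pvPrefixB "Saturday (Rest)" = "saturday").symm
  · exact (by decide : pvPrefixA "Sunday" = "sunday").trans
      (by decide : pvPrefixB "Sunday" = "sunday").symm

-- canonical form of A's output over the items list
def pvChainItems : List (String × String) → List (String × List (List (String × String))) →
    List (String × List (List (String × String)))
  | [], _ => []
  | (label, _) :: rest, its =>
      (its.filter (fun p => pvMatchB p.1 label)).map (fun p => (label, p.2)) ++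
        pvChainItems rest (its.filter (fun p => !pvMatchB p.1 label))

def pvResid : List (String × String) → List (String × List (List (String × String))) →
    List (String × List (List (String × String)))
  | [], its => its
  | (label, _) :: rest, its => pvResid rest (its.filter (fun p => !pvMatchB p.1 label))

-- canonical form over keys, values looked up in G
def pvChainK (G : PySem.Dict String (List (List (String × String)))) :
    List (String × String) → List String → List (String × List (List (String × String)))
  | [], ks => ks.map (fun k => (k, G.getD k []))
  | (label, _) :: rest, ks =>
      (ks.filter (fun k => pvMatchB k label)).map (fun k => (label, G.getD k [])) ++
        pvChainK G rest (ks.filter (fun k => !pvMatchB k label))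

lemma pvSetAddContains {s : PySem.Set String} {x k : String}
    (h1 : PySem.Set.contains s k = false) (h2 : k ≠ x) :
    PySem.Set.contains (PySem.Set.add s x) k = false := by
  simp only [PySem.Set.add]
  split_ifs with h
  · exact h1
  · simp [PySem.Set.contains] at h1 ⊢
    exact ⟨h1, h2⟩

lemma inner_spec (label : String) :
    ∀ (R L : List (String × List (List (String × String))))
      (seen : PySem.Set String) (out : List (String × List (List (String × String)))),
    ((L ++ R).map Prod.fst).Nodup →
    (∀ k ∈ (L ++ R).map Prod.fst, seen.contains k = false) →
    ∃ seen' : PySem.Set String,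
      (R.map Prod.fst).foldl (fun st2 key =>
          if pvMatchA key label then
            match st2.1.pop? key with
            | some (v, d') => (d', (PySem.Set.add st2.2.1 key, st2.2.2 ++ [(label, v)]))
            | none => st2
          else st2) (PySem.Dict.mk (L ++ R), (seen, out)) =
        (PySem.Dict.mk (L ++ R.filter (fun p => !pvMatchA p.1 label)),
          (seen', out ++ (R.filter (fun p => pvMatchA p.1 label)).map (fun p => (label, p.2)))) ∧
      ∀ k ∈ (L ++ R.filter (fun p => !pvMatchA p.1 label)).map Prod.fst, seen'.contains k = false := by
  intro R
  induction R with
  | nil =>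
    intro L seen out h hs
    exact ⟨seen, by simp, by simpa using hs⟩
  | cons p R' ih =>
    intro L seen out h hs
    obtain ⟨k, v⟩ := p
    have hmap : ((L ++ (k, v) :: R').map Prod.fst) = L.map Prod.fst ++ k :: R'.map Prod.fst := by
      simp
    rw [hmap] at h hs
    have hkL : k ∉ L.map Prod.fst := by
      intro hk
      exact (List.nodup_append.mp h).2.2 k hk k List.mem_cons_self rfl
    have hkR' : k ∉ R'.map Prod.fst :=
      (List.nodup_cons.mp (List.nodup_append.mp h).2.1).1
    simp only [List.map_cons, List.foldl_cons]
    by_cases hm : pvMatchA k label = true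
    · -- matching key: popped
      have hget : (PySem.Dict.mk (L ++ (k, v) :: R')).get? k = some v := by
        have hnone : List.find? (fun p => p.1 == k) L = none :=
          List.find?_eq_none.mpr (fun p hp => by
            simp only [Bool.not_eq_true]
            exact beq_eq_false_iff_ne.mpr (fun hc => hkL (List.mem_map.mpr ⟨p, hp, hc⟩)))
        simp only [PySem.Dict.get?, List.find?_append, hnone, Option.none_or]
        simp
      have herase : (PySem.Dict.mk (L ++ (k, v) :: R')).erase k = PySem.Dict.mk (L ++ R') := by
        have hL : List.filter (fun p => !(p.1 == k)) L = L :=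
          List.filter_eq_self.mpr (fun p hp => by
            simp only [Bool.not_eq_eq_eq_not, Bool.not_true]
            exact beq_eq_false_iff_ne.mpr (fun hc => hkL (List.mem_map.mpr ⟨p, hp, hc⟩)))
        have hR : List.filter (fun p => !(p.1 == k)) R' = R' :=
          List.filter_eq_self.mpr (fun p hp => by
            simp only [Bool.not_eq_eq_eq_not, Bool.not_true]
            exact beq_eq_false_iff_ne.mpr (fun hc => hkR' (List.mem_map.mpr ⟨p, hp, hc⟩)))
        simp only [PySem.Dict.erase, List.filter_append, List.filter_cons]
        simp [hL, hR]
      have hpop : (PySem.Dict.mk (L ++ (k, v) :: R')).pop? k = some (v, PySem.Dict.mk (L ++ R')) := by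
        simp only [PySem.Dict.pop?, hget, Option.map_some, herase]
      have hnodup' : ((L ++ R').map Prod.fst).Nodup := by
        simp only [List.map_append]
        rcases List.nodup_append.mp h with ⟨h1, h2, h3⟩
        exact List.nodup_append.mpr ⟨h1, (List.nodup_cons.mp h2).2,
          fun a ha b hb => h3 a ha b (List.mem_cons_of_mem k hb)⟩
      have hs' : ∀ k' ∈ (L ++ R').map Prod.fst, (PySem.Set.add seen k).contains k' = false := by
        intro k' hk'
        simp only [List.map_append] at hk'
        have hne : k' ≠ k := by
          rintro rfl
          rcases List.mem_append.mp hk' with hl | hr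
          · exact hkL hl
          · exact hkR' hr
        refine pvSetAddContains ?_ hne
        apply hs
        rcases List.mem_append.mp hk' with hl | hr
        · exact List.mem_append.mpr (Or.inl hl)
        · exact List.mem_append.mpr (Or.inr (by simp [hr]))
      obtain ⟨seen', heq, hdis⟩ := ih L (PySem.Set.add seen k) (out ++ [(label, v)]) hnodup' hs'
      refine ⟨seen', ?_, ?_⟩
      · rw [if_pos hm, hpop]
        rw [heq]
        rw [List.filter_cons, List.filter_cons]
        simp only [hm, Bool.not_true, Bool.false_eq_true, if_false, if_pos]
        simp
      · rw [List.filter_cons]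
        simp only [hm, Bool.not_true, Bool.false_eq_true, if_false]
        exact hdis
    · -- non-matching key: untouched, slides into the kept prefix
      have hb : pvMatchA k label = false := by
        cases hx : pvMatchA k label
        · rfl
        · exact absurd hx hm
      have hL' : L ++ (k, v) :: R' = (L ++ [(k, v)]) ++ R' := by
        rw [List.append_cons]
      have hnodup' : (((L ++ [(k, v)]) ++ R').map Prod.fst).Nodup := by
        rw [← hL', hmap]; exact h
      have hs' : ∀ k' ∈ ((L ++ [(k, v)]) ++ R').map Prod.fst, seen.contains k' = false := by
        rw [← hL', hmap]; exact hs
      obtain ⟨seen', heq, hdis⟩ := ih (L ++ [(k, v)]) seen out hnodup' hs'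
      refine ⟨seen', ?_, ?_⟩
      · rw [if_neg hm]
        rw [show PySem.Dict.mk (L ++ (k, v) :: R') = PySem.Dict.mk ((L ++ [(k, v)]) ++ R') from by rw [hL']]
        rw [heq]
        rw [List.filter_cons, List.filter_cons]
        simp only [hb, Bool.not_false, if_pos, Bool.false_eq_true, if_false]
        rw [List.append_cons]
        simp
      · intro k' hk'
        apply hdis
        rw [List.filter_cons] at hk'
        simp only [hb, Bool.not_false, if_pos] at hk'
        rw [← List.append_cons]
        exact hk'

lemma outer_spec :
    ∀ (segs : List (String × String)) (d : PySem.Dict String (List (List (String × String))))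
      (seen : PySem.Set String) (out : List (String × List (List (String × String)))),
    (∀ s ∈ segs, pvPrefixA s.1 = pvPrefixB s.1) →
    d.keys.Nodup →
    (∀ k ∈ d.keys, seen.contains k = false) →
    ∃ seen' : PySem.Set String,
      segs.foldl (fun st seg => pvInnerA seg.1 st) (d, (seen, out)) =
        (PySem.Dict.mk (pvResid segs d.items), (seen', out ++ pvChainItems segs d.items)) ∧
      ∀ k ∈ (pvResid segs d.items).map Prod.fst, seen'.contains k = false := by
  intro segs
  induction segs with
  | nil =>
    intro d seen out _ _ hdisj
    refine ⟨seen, by simp [pvResid, pvChainItems], ?_⟩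
    intro k hk
    apply hdisj
    exact hk
  | cons s rest ih =>
    intro d seen out hAB hnd hdisj
    obtain ⟨label, de⟩ := s
    have hm : ∀ k, pvMatchA k label = pvMatchB k label := by
      intro k
      unfold pvMatchA pvMatchB
      rw [hAB (label, de) List.mem_cons_self]
    have hnd' : ((([] : List (String × List (List (String × String)))) ++ d.items).map Prod.fst).Nodup := by
      simp only [List.nil_append]
      exact hnd
    have hdisj' : ∀ k ∈ (([] : List (String × List (List (String × String)))) ++ d.items).map Prod.fst,
        seen.contains k = false := by
      simp only [List.nil_append]
      exact hdisj
    obtain ⟨seen1, heq1, hdis1⟩ := inner_spec label d.items [] seen out hnd' hdisj'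
    simp only [List.foldl_cons]
    have hinner : pvInnerA label (d, (seen, out)) =
        (PySem.Dict.mk (d.items.filter (fun p => !pvMatchA p.1 label)),
          (seen1, out ++ (d.items.filter (fun p => pvMatchA p.1 label)).map (fun p => (label, p.2)))) := by
      unfold pvInnerA
      exact heq1
    rw [hinner]
    have hnd2 : (PySem.Dict.mk (d.items.filter (fun p => !pvMatchA p.1 label))).keys.Nodup :=
      List.Nodup.sublist (List.Sublist.map Prod.fst List.filter_sublist) hnd
    have hAB2 : ∀ s ∈ rest, pvPrefixA s.1 = pvPrefixB s.1 :=
      fun s hs => hAB s (List.mem_cons_of_mem _ hs)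
    have hdis1' : ∀ k ∈ (PySem.Dict.mk (d.items.filter (fun p => !pvMatchA p.1 label))).keys,
        seen1.contains k = false := by
      intro k hk
      apply hdis1
      exact hk
    obtain ⟨seen', heq2, hdis2⟩ := ih (PySem.Dict.mk (d.items.filter (fun p => !pvMatchA p.1 label)))
      seen1 (out ++ (d.items.filter (fun p => pvMatchA p.1 label)).map (fun p => (label, p.2)))
      hAB2 hnd2 hdis1'
    have hfilt : d.items.filter (fun p => !pvMatchA p.1 label) =
        d.items.filter (fun p => !pvMatchB p.1 label) := by simp only [hm]
    have hfilt2 : d.items.filter (fun p => pvMatchA p.1 label) =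
        d.items.filter (fun p => pvMatchB p.1 label) := by simp only [hm]
    refine ⟨seen', ?_, ?_⟩
    · rw [heq2]
      simp only [pvResid, pvChainItems, hfilt, hfilt2, List.append_assoc]
    · intro k hk
      apply hdis2
      simp only [pvResid, hfilt] at hk ⊢
      exact hk

lemma chainK_spec (G : PySem.Dict String (List (List (String × String)))) :
    ∀ (segs : List (String × String)) (ks : List String),
    pvChainItems segs (ks.map (fun k => (k, G.getD k []))) ++
        pvResid segs (ks.map (fun k => (k, G.getD k []))) = pvChainK G segs ks := by
  intro segs
  induction segs with
  | nil => intro ks; simp [pvChainItems, pvResid, pvChainK]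
  | cons s rest ih =>
    intro ks
    obtain ⟨label, d⟩ := s
    simp only [pvChainItems, pvResid, pvChainK]
    rw [List.append_assoc, List.filter_map, List.filter_map, List.map_map]
    have hcomp : ((fun p : String × List (List (String × String)) => !pvMatchB p.1 label) ∘
        (fun k => (k, G.getD k []))) = fun k => !pvMatchB k label := by funext k; simp [Function.comp]
    have hcomp2 : ((fun p : String × List (List (String × String)) => pvMatchB p.1 label) ∘
        (fun k => (k, G.getD k []))) = fun k => pvMatchB k label := by funext k; simp [Function.comp]
    have hcomp3 : ((fun p : String × List (List (String × String)) => (label, p.2)) ∘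
        (fun k : String => (k, G.getD k []))) = fun k : String => (label, G.getD k []) := by
      funext k; simp [Function.comp]
    rw [hcomp, hcomp2, hcomp3, ih (ks.filter (fun k => !pvMatchB k label))]

lemma final_append_all (seen : PySem.Set String) :
    ∀ (its : List (String × List (List (String × String))))
      (out : List (String × List (List (String × String)))),
    (∀ p ∈ its, PySem.Set.contains seen p.1 = false) →
    its.foldl (fun out p => if PySem.Set.contains seen p.1 then out else out ++ [p]) out = out ++ its := by
  intro its
  induction its with
  | nil => intro out _; simp
  | cons p t ih =>
    intro out h
    simp only [List.foldl_cons, h p List.mem_cons_self, Bool.false_eq_true, if_false]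
    rw [ih (out ++ [p]) (fun q hq => h q (List.mem_cons_of_mem p hq))]
    simp

lemma A_canonical (ce : List (List (String × String))) :
    segment_events_py ce =
      pvChainK (pvGroupDays ce) pvSegments (pvGroupDays ce).keys := by
  have hnd : (pvGroupDays ce).keys.Nodup := by
    unfold pvGroupDays
    exact PySem.Dict.nodup_keys_foldl_modify_key ce pvDayOf []
      (fun _ ev => fun l => l ++ [ev]) PySem.Dict.empty PySem.Dict.nodup_keys_empty
  obtain ⟨seen', heq, hdis⟩ := outer_spec pvSegments (pvGroupDays ce) (PySem.Set.ofList []) []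
    pvPrefix_eq hnd (by intro k _; rfl)
  unfold segment_events_py
  dsimp only
  rw [heq]
  rw [final_append_all seen' _ _ (fun p hp => hdis p.1 (List.mem_map.mpr ⟨p, hp, rfl⟩))]
  simp only [List.nil_append]
  rw [PySem.Dict.items_eq_map_keys (pvGroupDays ce) hnd []]
  exact chainK_spec (pvGroupDays ce) pvSegments (pvGroupDays ce).keys

-- ---- B side ----

lemma insertBy_append_skip {α : Type} (before : α → α → Bool) (x : α) :
    ∀ (as bs : List α), (∀ y ∈ as, before x y = false) →
    PySem.List.insertBy before x (as ++ bs) = as ++ PySem.List.insertBy before x bs := by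
  intro as
  induction as with
  | nil => intro bs _; simp
  | cons a t ih =>
    intro bs h
    have ha : before x a = false := h a (by simp)
    simp only [List.cons_append, PySem.List.insertBy, ha]
    simp only [Bool.false_eq_true, if_false]
    rw [ih bs (fun y hy => h y (by simp [hy]))]

lemma insertBy_head_lt {α : Type} (before : α → α → Bool) (x : α) (l : List α)
    (h : ∀ y ∈ l, before x y = true) :
    PySem.List.insertBy before x l = x :: l := by
  cases l with
  | nil => rfl
  | cons y t => simp [PySem.List.insertBy, h y (by simp)]

lemma insertBy_flatMap {α : Type} (key : α → Nat) (x : α) :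
    ∀ (is : List Nat) (bs : Nat → List α),
    is.Pairwise (· < ·) → (∀ i ∈ is, ∀ y ∈ bs i, key y = i) → key x ∈ is →
    PySem.List.insertBy (fun a b => decide (key a < key b)) x (is.flatMap bs) =
      is.flatMap (fun i => bs i ++ if key x = i then [x] else []) := by
  intro is
  induction is with
  | nil => intro bs _ _ hx; cases hx
  | cons i rest ih =>
    intro bs hp hb hx
    have hrest_gt : ∀ j ∈ rest, i < j := (List.pairwise_cons.mp hp).1
    have hskip : ∀ y ∈ bs i, (fun a b => decide (key a < key b)) x y = false := by
      intro y hy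
      have := hb i (by simp) y hy
      simp only [decide_eq_false_iff_not, not_lt, this]
      rcases List.mem_cons.mp hx with h | h
      · omega
      · exact Nat.le_of_lt (hrest_gt _ h)
    simp only [List.flatMap_cons]
    rw [insertBy_append_skip _ _ _ _ hskip]
    by_cases hxi : key x = i
    · have htail : ∀ y ∈ rest.flatMap bs, (fun a b => decide (key a < key b)) x y = true := by
        intro y hy
        obtain ⟨j, hj, hyj⟩ := List.mem_flatMap.mp hy
        have := hb j (by simp [hj]) y hyj
        simp only [decide_eq_true_eq, this, hxi]
        exact hrest_gt _ hj
      rw [insertBy_head_lt _ _ _ htail, if_pos hxi]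
      have hnox : rest.flatMap (fun j => bs j ++ if key x = j then [x] else []) = rest.flatMap bs := by
        apply List.flatMap_congr
        intro j hj
        rw [if_neg (by have := hrest_gt _ hj; omega)]
        simp
      rw [hnox]; simp
    · have hx' : key x ∈ rest := List.mem_cons.mp hx |>.resolve_left hxi
      rw [ih bs (List.pairwise_cons.mp hp).2 (fun j hj => hb j (by simp [hj])) hx', if_neg hxi]
      simp

lemma sorted_nat_buckets {α : Type} (key : α → Nat) (n : Nat) :
    ∀ (xs : List α), (∀ x ∈ xs, key x ≤ n) →
    PySem.List.sorted xs key =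
      (List.range (n + 1)).flatMap (fun i => xs.filter (fun x => key x == i)) := by
  intro xs
  induction xs using List.reverseRecOn with
  | nil =>
    intro _
    rw [PySem.List.sorted_eq_foldl_insertBy]
    simp
  | append_singleton t x ih =>
    intro h
    rw [PySem.List.sorted_eq_foldl_insertBy, List.foldl_append, List.foldl_cons, List.foldl_nil,
      ← PySem.List.sorted_eq_foldl_insertBy, ih (fun y hy => h y (by simp [hy]))]
    rw [insertBy_flatMap key x _ _ List.pairwise_lt_range
      (by intro i _ y hy; simpa using (List.mem_filter.mp hy).2)
      (List.mem_range.mpr (Nat.lt_succ_of_le (h x (by simp))))]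
    apply List.flatMap_congr
    intro i _
    rw [List.filter_append]
    congr 1
    by_cases hxi : key x = i
    · simp [List.filter, hxi]
    · have hb : (key x == i) = false := by simp [hxi]
      simp [List.filter, hb]; exact hxi

lemma segIndexAux_shift (kl : String) :
    ∀ (segs : List (String × String)) (i : Nat),
    pvSegIndexAux kl i segs = i + pvSegIndexAux kl 0 segs := by
  intro segs
  induction segs with
  | nil => intro i; simp [pvSegIndexAux]
  | cons s rest ih =>
    intro i
    obtain ⟨label, d⟩ := s
    simp only [pvSegIndexAux]
    by_cases h : PySem.Str.startswith kl (pvPrefixB label) = true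
    · rw [if_pos h, if_pos h]; omega
    · rw [if_neg h, if_neg h, ih (i+1), ih 1]; omega

lemma segIndexAux_le (kl : String) :
    ∀ (segs : List (String × String)) (i : Nat), pvSegIndexAux kl i segs ≤ i + segs.length := by
  intro segs
  induction segs with
  | nil => intro i; simp [pvSegIndexAux]
  | cons s rest ih =>
    intro i
    obtain ⟨label, d⟩ := s
    simp only [pvSegIndexAux, List.length_cons]
    by_cases h : PySem.Str.startswith kl (pvPrefixB label) = true
    · rw [if_pos h]; omega
    · rw [if_neg h]; have := ih (i+1); omega

lemma segIndex_le (k : String) : pvSegIndex k ≤ pvSegments.length := by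
  have := segIndexAux_le (PySem.Str.lower k) pvSegments 0
  simpa [pvSegIndex] using this

lemma bridge (G : PySem.Dict String (List (List (String × String)))) :
    ∀ (segs : List (String × String)) (i : Nat) (ks : List String),
    i + segs.length = pvSegments.length →
    (∀ j, j < segs.length → segs[j]? = pvSegments[i + j]?) →
    (∀ k ∈ ks, pvSegIndex k = i + pvSegIndexAux (PySem.Str.lower k) 0 segs) →
    ((List.range' i (segs.length + 1)).flatMap
        (fun j => ks.filter (fun k => pvSegIndex k == j))).map
      (fun key =>
        ((if pvSegIndex key < pvSegments.length
            then (pvSegments.getD (pvSegIndex key) ("", "")).1 else key), G.getD key [])) =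
      pvChainK G segs ks := by
  intro segs
  induction segs with
  | nil =>
    intro i ks hlen hlbl h1
    simp only [List.length_nil, Nat.add_zero] at hlen
    subst hlen
    simp only [pvChainK, List.length_nil, Nat.zero_add]
    rw [List.range'_succ]
    simp only [List.range'_zero, List.flatMap_cons, List.flatMap_nil, List.append_nil]
    have hall : ∀ k ∈ ks, pvSegIndex k = pvSegments.length := by
      intro k hk
      have h := h1 k hk
      simpa [pvSegIndexAux] using h
    have hfilt : ks.filter (fun k => pvSegIndex k == pvSegments.length) = ks :=
      List.filter_eq_self.mpr (fun k hk => by simp [hall k hk])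
    rw [hfilt]
    apply List.map_congr_left
    intro k hk
    simp [hall k hk]
  | cons s rest ih =>
    intro i ks hlen hlbl h1
    obtain ⟨label, de⟩ := s
    simp only [List.length_cons] at hlen
    have hi : i < pvSegments.length := by omega
    have hseg_i : pvSegments[i]? = some (label, de) := by
      have h0 := hlbl 0 (by simp)
      simp only [Nat.add_zero] at h0
      simpa using h0.symm
    have hidx : ∀ k ∈ ks,
        (pvMatchB k label = true → pvSegIndex k = i) ∧
        (pvMatchB k label = false →
          pvSegIndex k = i + 1 + pvSegIndexAux (PySem.Str.lower k) 0 rest) := by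
      intro k hk
      have h := h1 k hk
      constructor
      · intro hmB
        rw [h]
        simp only [pvSegIndexAux, pvMatchB_eq, hmB, if_pos]
        omega
      · intro hmB
        rw [h]
        simp only [pvSegIndexAux, pvMatchB_eq, hmB, Bool.false_eq_true, if_false]
        rw [segIndexAux_shift (PySem.Str.lower k) rest 1]
        omega
    simp only [List.length_cons]
    rw [List.range'_succ, List.flatMap_cons, List.map_append]
    simp only [pvChainK]
    congr 1
    · have hfe : ks.filter (fun k => pvSegIndex k == i) = ks.filter (fun k => pvMatchB k label) := by
        apply List.filter_congr
        intro k hk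
        rcases hidx k hk with ⟨hpos, hneg⟩
        cases hmB : pvMatchB k label
        · rw [hneg hmB]
          simp only [beq_eq_false_iff_ne, ne_eq]
          omega
        · rw [hpos hmB]
          simp
      rw [hfe]
      apply List.map_congr_left
      intro k hk
      have hkm := List.mem_filter.mp hk
      have hik : pvSegIndex k = i := (hidx k hkm.1).1 hkm.2
      rw [hik, if_pos hi]
      rw [List.getD_eq_getElem?_getD, hseg_i]
      rfl
    · have hks' : ∀ j ∈ List.range' (i + 1) (rest.length + 1),
          ks.filter (fun k => pvSegIndex k == j) =
            (ks.filter (fun k => !pvMatchB k label)).filter (fun k => pvSegIndex k == j) := by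
        intro j hj
        have hij : i + 1 ≤ j := (List.mem_range'_1.mp hj).1
        rw [List.filter_filter]
        apply List.filter_congr
        intro k hk
        rcases hidx k hk with ⟨hpos, hneg⟩
        cases hmB : pvMatchB k label
        · simp
        · rw [hpos hmB]
          simp only [Bool.not_true, Bool.and_false]
          simp only [beq_eq_false_iff_ne, ne_eq]
          omega
      rw [List.flatMap_congr hks']
      refine ih (i + 1) (ks.filter fun k => !pvMatchB k label) (by omega) ?_ ?_
      · intro j hj
        have h := hlbl (j + 1) (by simp; omega)
        rw [show i + (j + 1) = i + 1 + j by omega] at h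
        simpa using h
      · intro k hk
        have hkm := List.mem_filter.mp hk
        have hmB : pvMatchB k label = false := by
          have := hkm.2
          simp only [Bool.not_eq_eq_eq_not, Bool.not_true] at this
          exact this
        have := (hidx k hkm.1).2 hmB
        omega

lemma B_canonical (ce : List (List (String × String))) :
    segment_events_py_alt ce =
      pvChainK (pvGroupDays ce) pvSegments (pvGroupDays ce).keys := by
  unfold segment_events_py_alt
  dsimp only
  rw [sorted_nat_buckets (fun k => pvSegIndex k) pvSegments.length (pvGroupDays ce).keys
    (fun k _ => segIndex_le k)]
  rw [PySem.List.foldl_append_singleton_eq_map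
    (fun key => ((if pvSegIndex key < pvSegments.length
      then (pvSegments.getD (pvSegIndex key) ("", "")).1 else key), (pvGroupDays ce).getD key []))]
  rw [List.range_eq_range']
  simp only [List.nil_append]
  exact bridge (pvGroupDays ce) pvSegments 0 (pvGroupDays ce).keys (by simp) (by intro j hj; simp)
    (by intro k _; simp [pvSegIndex])

-- ===== VERDICT (by name: the statement is the Claim_ definition above) =====
theorem segment_events_py_spec : Claim_equal_segment_events_py := by
  intro ce _
  unfold Spec_segment_events_py
  rw [A_canonical, B_canonical]
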